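-- pv_equiv track=rewrite | github.com/leeyounwoo/Algorithm | 코딩 테스트/이베이/s5.py | solution
-- ===== SOURCE A (Python) =====
-- from itertools import combinations
--
-- def isPalindrome(word1, word2):
--     flag1 = word1 + word2
--     flag2 = word2 + word1
--     if flag1 == flag1[::-1] or flag2 == flag2[::-1]:
--         return True
--     else:
--         return False
--
-- def solution(P):
--     words_list = P
--     ans = []
--     num1 = words_list.pop(0)
--     for num2 in words_list:
--         temp_words_list = words_list[:]
--         temp_words_list.remove(num2)
--         if isPalindrome(num1, num2):
--             temp = []
--             indexs = [i for i in range(len(temp_words_list))]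
--             for com in combinations(indexs, 2):
--                 temp.append(com)
--             length = len(temp_words_list)
--             a = []
--             for com in combinations(temp, length // 2):
--                 check = [False] * length
--                 flag_com = False
--                 for i in range(len(com)):
--                     if check[com[i][0]] or check[com[i][1]]:
--                         flag_com = True
--                         break
--                     check[com[i][0]] = True
--                     check[com[i][1]] = True
--                 if flag_com:
--                     continue
--                 a.append(com)
--
--             for com in a:
--                 for b in com:
--                     if not isPalindrome(temp_words_list[b[0]], temp_words_list[b[1]]):
--                         break
--                 else:
--                     ans.append(num2)
--                     break
--         else:
--             continue
--
--     return ans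
-- ===== SOURCE B (Python) =====
-- def isPalindrome(word1, word2):
--     flag1 = word1 + word2
--     flag2 = word2 + word1
--     return flag1 == flag1[::-1] or flag2 == flag2[::-1]
--
--
-- def minus_first(xs, x):
--     ys = xs.copy()
--     ys.remove(x)
--     return ys
--
--
-- def matchable(ws):
--     # can ws be split into len(ws)//2 disjoint palindrome pairs
--     # (leaving one word unmatched when len(ws) is odd)?
--     if len(ws) <= 1:
--         return True
--     if len(ws) % 2 == 1 and matchable(ws[1:]):
--         return True
--     head, rest = ws[0], ws[1:]
--     for i in range(len(rest)):
--         if isPalindrome(head, rest[i]) and matchable(rest[:i] + rest[i + 1:]):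
--             return True
--     return False
--
--
-- def solution(P):
--     head, others = P[0], P[1:]
--     return [w for w in others
--             if isPalindrome(head, w) and matchable(minus_first(others, w))]
-- ===== Notes on version B (the rewrite author's own statement) =====
-- stated objective: alternative
-- what changed: A enumerates every size-(n//2) subset of the set of all index pairs (combinations of combinations) and tests each subset for disjointness and palindromicity; B replaces that by a recursive backtracking search that always pairs (or, at odd length, skips) the first remaining word, so only genuine matchings are explored.
import Mathlib
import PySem

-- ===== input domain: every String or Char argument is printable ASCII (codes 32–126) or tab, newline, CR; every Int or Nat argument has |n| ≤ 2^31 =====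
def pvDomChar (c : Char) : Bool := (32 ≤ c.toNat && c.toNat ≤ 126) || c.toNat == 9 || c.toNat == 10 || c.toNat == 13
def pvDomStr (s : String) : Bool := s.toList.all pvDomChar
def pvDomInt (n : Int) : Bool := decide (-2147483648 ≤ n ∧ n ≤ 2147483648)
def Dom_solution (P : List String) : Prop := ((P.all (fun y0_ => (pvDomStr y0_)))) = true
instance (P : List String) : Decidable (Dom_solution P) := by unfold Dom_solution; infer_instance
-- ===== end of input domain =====

-- B replaces A's enumeration of all sets of index pairs by a recursive matching search;
-- equivalence is about the RETURN value only (Python A pops P[0] from its argument in place, B does not mutate P).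

-- ===== PORT A =====
-- helper isPalindrome, shared verbatim by both Pythons (B defines the identical helper);
-- strings are handled as code-point lists and s[::-1] is reversal (PySem.List.slice?_none_none_neg_one), exact
def isPalindrome (word1 word2 : String) : Bool :=
  let flag1 := word1.toList ++ word2.toList
  let flag2 := word2.toList ++ word1.toList
  if flag1 == flag1.reverse || flag2 == flag2.reverse then true else false

-- combinations(indexs, 2) as pairs, in itertools' (index-lexicographic) order
def comb2 : List Nat → List (Nat × Nat)
  | [] => []
  | x :: xs => xs.map (fun y => (x, y)) ++ comb2 xs

-- the inner 'for i in range(len(com))' loop: returns flag_com (break on a reused index)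
def checkLoop : List (Nat × Nat) → List Bool → Bool
  | [], _ => false
  | p :: rest, check =>
    if check.getD p.1 false || check.getD p.2 false then true
    else checkLoop rest ((check.set p.1 true).set p.2 true)

-- the loop building `a` (skip flagged combinations)
def buildA (n : Nat) : List (List (Nat × Nat)) → List (List (Nat × Nat))
  | [] => []
  | com :: rest =>
    if checkLoop com (List.replicate n false) then buildA n rest
    else com :: buildA n rest

-- the 'for b in com: … break / else' loop
def allPal (L : List String) : List (Nat × Nat) → Bool
  | [] => true
  | b :: rest =>
    if !(isPalindrome (L.getD b.1 "") (L.getD b.2 "")) then false else allPal L rest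

-- the final 'for com in a' loop (break after the first success)
def scanA (L : List String) : List (List (Nat × Nat)) → Bool
  | [] => false
  | com :: rest => if allPal L com then true else scanA L rest

-- the body of A's 'if isPalindrome(num1, num2)' branch, deciding whether num2 is appended
def acceptA (L : List String) : Bool :=
  let indexs := List.range L.length
  let temp := (comb2 indexs).foldl (fun acc c => acc ++ [c]) []
  let length := L.length
  let a := buildA length (PySem.List.combinations temp (length / 2))
  scanA L a

-- A's outer 'for num2 in words_list' loop building ans
def goA (num1 : String) (full : List String) : List String → List String
  | [] => []
  | num2 :: rest =>
    let temp := (PySem.List.remove? full num2).getD []   -- num2 ∈ full at every call: the default is dead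
    if isPalindrome num1 num2 then
      if acceptA temp then num2 :: goA num1 full rest else goA num1 full rest
    else goA num1 full rest

def solution (P : List String) : List String :=
  match P with
  | [] => []          -- words_list.pop(0) raises IndexError here; excluded by Pre_solution
  | num1 :: words_list => goA num1 words_list words_list

-- ===== PORT B =====
-- minus_first(xs, x): copy + list.remove (x ∈ xs at every call: the default is dead)
def minusFirst (xs : List String) (x : String) : List String :=
  (PySem.List.remove? xs x).getD xs

mutual
  -- can ws be split into len(ws)//2 disjoint palindrome pairs (one word left over when odd)?
  def matchable : List String → Bool
    | [] => true
    | [_] => true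
    | w :: ws =>
      if (ws.length + 1) % 2 == 1 && matchable ws then true
      else tryPair w [] ws
  termination_by l => (l.length, l.length + 1)
  decreasing_by all_goals simp_wf; omega
  -- the 'for i in range(len(rest))' loop; pre = rest[:i], l = rest[i:]
  def tryPair (head : String) (pre : List String) : List String → Bool
    | [] => false
    | x :: xs =>
      if isPalindrome head x && matchable (pre ++ xs) then true
      else tryPair head (pre ++ [x]) xs
  termination_by l => (pre.length + l.length + 1, l.length)
  decreasing_by all_goals simp_wf; omega
end

def solution_alt (P : List String) : List String :=
  match P with
  | [] => []          -- P[0] raises IndexError here; excluded by Pre_solution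
  | head :: others =>
    others.filter (fun w => isPalindrome head w && matchable (minusFirst others w))

-- ===== PRECONDITION & SPEC =====
-- Pre_ excludes only the empty list, on which Python A raises IndexError (pop from empty list)
def Pre_solution (P : List String) : Prop := P ≠ []
instance (P : List String) : Decidable (Pre_solution P) := by unfold Pre_solution; infer_instance
def pvWitness_solution : List String := ["a", "ba", "ab"]

def Spec_solution (P : List String) (out : List String) : Prop := out = solution_alt P
instance (P : List String) (out : List String) : Decidable (Spec_solution P out) := by unfold Spec_solution; infer_instance

-- ===== CLAIM (what is proved, stated in full; the proofs are below) =====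
def Claim_equal_solution : Prop := ∀ (P : List String), Dom_solution P → Pre_solution P → Spec_solution P (solution P)

-- ===== LEMMAS AND PROOFS =====

-- proof-side vocabulary
def lexLt (p q : Nat × Nat) : Prop := p.1 < q.1 ∨ (p.1 = q.1 ∧ p.2 < q.2)

def Disj (p q : Nat × Nat) : Prop := p.1 ≠ q.1 ∧ p.1 ≠ q.2 ∧ p.2 ≠ q.1 ∧ p.2 ≠ q.2

def Ok (L : List String) (com : List (Nat × Nat)) : Prop :=
  (∀ p ∈ com, p.1 < p.2 ∧ p.2 < L.length) ∧ com.Pairwise Disj ∧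
  ∀ p ∈ com, isPalindrome (L.getD p.1 "") (L.getD p.2 "") = true

def M (L : List String) : Prop :=
  ∃ com : List (Nat × Nat), com.Pairwise lexLt ∧ com.length = L.length / 2 ∧ Ok L com

-- basic membership facts about comb2
lemma mem_comb2_both {xs : List Nat} {p : Nat × Nat} (h : p ∈ comb2 xs) : p.1 ∈ xs ∧ p.2 ∈ xs := by
  induction xs with
  | nil => simp [comb2] at h
  | cons x xs ih =>
    simp only [comb2, List.mem_append, List.mem_map] at h
    rcases h with ⟨y, hy, hp⟩ | h
    · subst hp; exact ⟨List.mem_cons_self, List.mem_cons_of_mem _ hy⟩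
    · exact ⟨List.mem_cons_of_mem _ (ih h).1, List.mem_cons_of_mem _ (ih h).2⟩

lemma mem_comb2 {xs : List Nat} (hs : xs.Pairwise (· < ·)) {p : Nat × Nat} :
    p ∈ comb2 xs ↔ p.1 ∈ xs ∧ p.2 ∈ xs ∧ p.1 < p.2 := by
  induction xs with
  | nil => simp [comb2]
  | cons x xs ih =>
    have hx : ∀ z ∈ xs, x < z := fun z hz => (List.pairwise_cons.mp hs).1 z hz
    have hs' := (List.pairwise_cons.mp hs).2
    constructor
    · intro h
      simp only [comb2, List.mem_append, List.mem_map] at h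
      rcases h with ⟨y, hy, hp⟩ | h
      · subst hp; exact ⟨List.mem_cons_self, List.mem_cons_of_mem _ hy, hx y hy⟩
      · obtain ⟨h1, h2, h3⟩ := (ih hs').mp h
        exact ⟨List.mem_cons_of_mem _ h1, List.mem_cons_of_mem _ h2, h3⟩
    · rintro ⟨h1, h2, h3⟩
      simp only [comb2, List.mem_append, List.mem_map]
      rcases List.mem_cons.mp h1 with e1 | m1
      · left
        rcases List.mem_cons.mp h2 with e2 | m2
        · omega
        · exact ⟨p.2, m2, by rw [← e1]⟩
      · right
        rcases List.mem_cons.mp h2 with e2 | m2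
        · exact absurd (hx p.1 m1) (by omega)
        · exact (ih hs').mpr ⟨m1, m2, h3⟩

lemma comb2_pairwise {xs : List Nat} (hs : xs.Pairwise (· < ·)) : (comb2 xs).Pairwise lexLt := by
  induction xs with
  | nil => simp [comb2]
  | cons x xs ih =>
    have hx : ∀ z ∈ xs, x < z := fun z hz => (List.pairwise_cons.mp hs).1 z hz
    have hs' := (List.pairwise_cons.mp hs).2
    simp only [comb2]
    apply List.pairwise_append.mpr
    refine ⟨?_, ih hs', ?_⟩
    · apply List.pairwise_map.mpr
      exact hs'.imp (fun {a b} hab => Or.inr ⟨rfl, hab⟩)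
    · intro a ha b hb
      simp only [List.mem_map] at ha
      obtain ⟨y, _, hy⟩ := ha
      have hb1 := (mem_comb2_both hb).1
      subst hy
      exact Or.inl (hx _ hb1)

lemma mem_comb2_range {n : Nat} {p : Nat × Nat} :
    p ∈ comb2 (List.range n) ↔ p.1 < p.2 ∧ p.2 < n := by
  rw [mem_comb2 (List.pairwise_lt_range)]
  simp only [List.mem_range]
  omega

-- sorted + subset ⇒ sublist (for the lexicographic order on pairs)
lemma sublist_of_lex {l l' : List (Nat × Nat)} (h1 : l.Pairwise lexLt) (h2 : l'.Pairwise lexLt)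
    (h3 : l ⊆ l') : l.Sublist l' := by
  have htrans : ∀ a b c : Nat × Nat, lexLt a b → lexLt b c → lexLt a c := by
    intro a b c hab hbc; unfold lexLt at *; omega
  have hirr : ∀ a : Nat × Nat, ¬ lexLt a a := by intro a; unfold lexLt; omega
  induction l' generalizing l with
  | nil => rw [List.subset_nil.mp h3]
  | cons y ys ih =>
    match l with
    | [] => exact List.nil_sublist _
    | x :: xs =>
      have hxl : ∀ z ∈ xs, lexLt x z := fun z hz => (List.pairwise_cons.mp h1).1 z hz
      have h1' := (List.pairwise_cons.mp h1).2
      have hyl : ∀ z ∈ ys, lexLt y z := fun z hz => (List.pairwise_cons.mp h2).1 z hz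
      have h2' := (List.pairwise_cons.mp h2).2
      by_cases hxy : x = y
      · subst hxy
        apply List.Sublist.cons₂
        apply ih h1' h2'
        intro z hz
        rcases List.mem_cons.mp (h3 (List.mem_cons_of_mem _ hz)) with e | m
        · exact absurd (e ▸ hxl z hz) (hirr x)
        · exact m
      · apply List.Sublist.cons
        apply ih h1 h2'
        intro z hz
        rcases List.mem_cons.mp (h3 hz) with e | m
        · exfalso
          subst e
          rcases List.mem_cons.mp hz with e' | m'
          · exact hxy e'.symm
          · have hxm : x ∈ ys := by
              rcases List.mem_cons.mp (h3 List.mem_cons_self) with e'' | m''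
              · exact absurd e'' hxy
              · exact m''
            exact hirr x (htrans _ _ _ (hxl z m') (hyl x hxm))
        · exact m

-- the check/flag loop detects exactly a reused index
lemma getD_set_true (check : List Bool) (i j : Nat) (hij : i < check.length) :
    ((check.set i true).getD j false) = if j = i then true else check.getD j false := by
  by_cases hj : j < check.length
  · by_cases hji : j = i
    · subst hji
      simp [List.getD_eq_getElem?_getD, List.getElem?_set_self (by omega)]
    · rw [List.getD_eq_getElem?_getD, List.getD_eq_getElem?_getD, List.getElem?_set_ne (by omega)]
      simp [hji]
  · have h1 : (check.set i true).length = check.length := by simp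
    rw [List.getD_eq_getElem?_getD, List.getD_eq_getElem?_getD,
      List.getElem?_eq_none (by omega), List.getElem?_eq_none (by omega)]
    simp
    intro h; omega

lemma checkLoop_false_iff (com : List (Nat × Nat)) (check : List Bool)
    (hb : ∀ p ∈ com, p.1 < p.2 ∧ p.2 < check.length) :
    checkLoop com check = false ↔
      com.Pairwise Disj ∧ ∀ p ∈ com, check.getD p.1 false = false ∧ check.getD p.2 false = false := by
  induction com generalizing check with
  | nil => simp [checkLoop]
  | cons p rest ih =>
    obtain ⟨hp12, hp2⟩ := hb p List.mem_cons_self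
    have hp1 : p.1 < check.length := by omega
    have hlen : ((check.set p.1 true).set p.2 true).length = check.length := by simp
    have hset : ∀ j, ((check.set p.1 true).set p.2 true).getD j false =
        if j = p.2 ∨ j = p.1 then true else check.getD j false := by
      intro j
      rw [getD_set_true _ p.2 j (by simpa using hp2), getD_set_true _ p.1 j hp1]
      by_cases h2 : j = p.2 <;> by_cases h1 : j = p.1 <;> simp [h1, h2]
    simp only [checkLoop]
    split_ifs with hflag
    · simp only [false_iff, not_and]
      intro _ hall
      obtain ⟨e1, e2⟩ := hall p List.mem_cons_self
      rw [e1, e2] at hflag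
      simp at hflag
    · rw [Bool.or_eq_true, not_or, Bool.not_eq_true, Bool.not_eq_true] at hflag
      rw [ih _ (fun q hq => by rw [hlen]; exact hb q (List.mem_cons_of_mem _ hq))]
      constructor
      · rintro ⟨hdisj, hall⟩
        refine ⟨List.pairwise_cons.mpr ⟨?_, hdisj⟩, ?_⟩
        · intro q hq
          obtain ⟨e1, e2⟩ := hall q hq
          rw [hset] at e1 e2
          refine ⟨?_, ?_, ?_, ?_⟩ <;>
            (first
              | (intro e; rw [if_pos (by omega)] at e1; cases e1)
              | (intro e; rw [if_pos (by omega)] at e2; cases e2))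
        · intro q hq
          rcases List.mem_cons.mp hq with e | m
          · subst e; exact ⟨hflag.1, hflag.2⟩
          · obtain ⟨e1, e2⟩ := hall q m
            rw [hset] at e1 e2
            by_cases c1 : q.1 = p.2 ∨ q.1 = p.1
            · rw [if_pos c1] at e1; cases e1
            · by_cases c2 : q.2 = p.2 ∨ q.2 = p.1
              · rw [if_pos c2] at e2; cases e2
              · rw [if_neg c1] at e1; rw [if_neg c2] at e2; exact ⟨e1, e2⟩
      · rintro ⟨hdisj, hall⟩
        have hd := List.pairwise_cons.mp hdisj
        refine ⟨hd.2, ?_⟩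
        intro q hq
        obtain ⟨d1, d2, d3, d4⟩ := hd.1 q hq
        obtain ⟨e1, e2⟩ := hall q (List.mem_cons_of_mem _ hq)
        rw [hset, hset]
        rw [if_neg (by omega), if_neg (by omega)]
        exact ⟨e1, e2⟩

lemma buildA_mem (n : Nat) (l : List (List (Nat × Nat))) (com : List (Nat × Nat)) :
    com ∈ buildA n l ↔ com ∈ l ∧ checkLoop com (List.replicate n false) = false := by
  induction l with
  | nil => simp [buildA]
  | cons c rest ih =>
    simp only [buildA]
    split_ifs with hflag
    · rw [ih]
      constructor
      · rintro ⟨h1, h2⟩; exact ⟨List.mem_cons_of_mem _ h1, h2⟩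
      · rintro ⟨h1, h2⟩
        rcases List.mem_cons.mp h1 with e | m
        · subst e; rw [hflag] at h2; cases h2
        · exact ⟨m, h2⟩
    · simp only [List.mem_cons, ih]
      constructor
      · rintro (e | ⟨m, h2⟩)
        · subst e; exact ⟨Or.inl rfl, by simpa using hflag⟩
        · exact ⟨Or.inr m, h2⟩
      · rintro ⟨(e | m), h2⟩
        · exact Or.inl e
        · exact Or.inr ⟨m, h2⟩

lemma allPal_iff (L : List String) (com : List (Nat × Nat)) :
    allPal L com = true ↔ ∀ p ∈ com, isPalindrome (L.getD p.1 "") (L.getD p.2 "") = true := by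
  induction com with
  | nil => simp [allPal]
  | cons p rest ih =>
    simp only [allPal]
    split_ifs with hp
    · simp only [Bool.not_eq_true'] at hp
      constructor
      · intro h; cases h
      · intro h
        have := h p List.mem_cons_self
        rw [this] at hp; cases hp
    · simp only [Bool.not_eq_true', Bool.not_eq_false] at hp
      rw [ih]
      constructor
      · intro h q hq
        rcases List.mem_cons.mp hq with e | m
        · subst e; exact hp
        · exact h q m
      · intro h q hq; exact h q (List.mem_cons_of_mem _ hq)

lemma scanA_iff (L : List String) (a : List (List (Nat × Nat))) :
    scanA L a = true ↔ ∃ com ∈ a, allPal L com = true := by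
  induction a with
  | nil => simp [scanA]
  | cons c rest ih =>
    simp only [scanA]
    split_ifs with hc
    · simp only [true_iff]
      exact ⟨c, List.mem_cons_self, hc⟩
    · rw [ih]
      constructor
      · rintro ⟨com, m, h⟩; exact ⟨com, List.mem_cons_of_mem _ m, h⟩
      · rintro ⟨com, m, h⟩
        rcases List.mem_cons.mp m with e | m'
        · subst e; exact absurd h hc
        · exact ⟨com, m', h⟩

-- A's acceptance test characterised
lemma acceptA_iff_M (L : List String) : acceptA L = true ↔ M L := by
  simp only [acceptA, PySem.List.foldl_append_singleton_eq_self, List.nil_append]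
  rw [scanA_iff]
  constructor
  · rintro ⟨com, hmem, hpal⟩
    rw [buildA_mem] at hmem
    obtain ⟨hc, hflag⟩ := hmem
    obtain ⟨hsub, hlen⟩ := (PySem.List.mem_combinations_iff _ _ _).mp hc
    have hbounds : ∀ p ∈ com, p.1 < p.2 ∧ p.2 < L.length := by
      intro p hp
      exact mem_comb2_range.mp (hsub.subset hp)
    have hchk := (checkLoop_false_iff com _ (by simpa using hbounds)).mp hflag
    exact ⟨com, (comb2_pairwise List.pairwise_lt_range).sublist hsub, hlen,
      hbounds, hchk.1, (allPal_iff L com).mp hpal⟩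
  · rintro ⟨com, hlex, hlen, hbounds, hdisj, hpal⟩
    refine ⟨com, ?_, (allPal_iff L com).mpr hpal⟩
    rw [buildA_mem]
    refine ⟨?_, ?_⟩
    · rw [PySem.List.mem_combinations_iff]
      refine ⟨sublist_of_lex hlex (comb2_pairwise List.pairwise_lt_range) ?_, hlen⟩
      intro p hp
      exact mem_comb2_range.mpr (hbounds p hp)
    · rw [checkLoop_false_iff com _ (by simpa using hbounds)]
      refine ⟨hdisj, fun p hp => ?_⟩
      constructor <;>
        (rw [List.getD_eq_getElem?_getD, List.getElem?_replicate]; split_ifs <;> rfl)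

-- B's loop characterised
lemma tryPair_iff (h : String) (l pre : List String) :
    tryPair h pre l = true ↔
      ∃ i < l.length, isPalindrome h (l.getD i "") = true ∧ matchable (pre ++ l.eraseIdx i) = true := by
  induction l generalizing pre with
  | nil =>
    rw [tryPair]
    simp
  | cons x xs ih =>
    rw [tryPair]
    split_ifs with hc
    · simp only [true_iff]
      rw [Bool.and_eq_true] at hc
      exact ⟨0, by simp, by simpa using hc.1, by simpa using hc.2⟩
    · rw [ih]
      constructor
      · rintro ⟨i, hi, hpal, hm⟩
        refine ⟨i + 1, by simpa using hi, by simpa using hpal, ?_⟩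
        simpa [List.append_assoc] using hm
      · rintro ⟨i, hi, hpal, hm⟩
        match i with
        | 0 =>
          exfalso
          apply hc
          rw [Bool.and_eq_true]
          exact ⟨by simpa using hpal, by simpa using hm⟩
        | i + 1 =>
          exact ⟨i, by simpa using hi, by simpa using hpal, by simpa [List.append_assoc] using hm⟩

lemma matchable_cons_iff (w x : String) (xs : List String) :
    matchable (w :: x :: xs) = true ↔
      (((x :: xs).length + 1) % 2 = 1 ∧ matchable (x :: xs) = true) ∨
      ∃ i < (x :: xs).length, isPalindrome w ((x :: xs).getD i "") = true ∧
        matchable ((x :: xs).eraseIdx i) = true := by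
  rw [matchable]
  case x_1 => simp
  split_ifs with hc
  · rw [Bool.and_eq_true, beq_iff_eq] at hc
    simp only [true_iff]
    exact Or.inl hc
  · rw [tryPair_iff]
    have hnc : ¬(((x :: xs).length + 1) % 2 = 1 ∧ matchable (x :: xs) = true) := by
      rintro ⟨h1, h2⟩
      exact hc (by rw [Bool.and_eq_true, beq_iff_eq]; exact ⟨h1, h2⟩)
    simp only [List.nil_append]
    tauto

-- index bookkeeping
lemma getD_eraseIdx (l : List String) (i j : Nat) :
    (l.eraseIdx i).getD j "" = if j < i then l.getD j "" else l.getD (j + 1) "" := by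
  rw [List.getD_eq_getElem?_getD, List.getElem?_eraseIdx]
  split_ifs <;> rw [List.getD_eq_getElem?_getD]

-- the flattened endpoint list of a matching (for the parity/pigeonhole argument)
lemma endpoints_length (com : List (Nat × Nat)) :
    (com.flatMap (fun p => [p.1, p.2])).length = 2 * com.length := by
  induction com with
  | nil => simp
  | cons p rest ih => simp only [List.flatMap_cons, List.length_append, List.length_cons,
      List.length_nil, ih]; omega

lemma endpoints_nodup (com : List (Nat × Nat)) (hd : com.Pairwise Disj)
    (hne : ∀ p ∈ com, p.1 ≠ p.2) : (com.flatMap (fun p => [p.1, p.2])).Nodup := by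
  induction com with
  | nil => simp
  | cons p rest ih =>
    have hd' := List.pairwise_cons.mp hd
    have hp12 := hne p List.mem_cons_self
    have hnotin : ∀ x, (x = p.1 ∨ x = p.2) → x ∉ rest.flatMap (fun q => [q.1, q.2]) := by
      intro x hx hmem
      obtain ⟨q, hq, hxq⟩ := List.mem_flatMap.mp hmem
      simp only [List.mem_cons, List.not_mem_nil, or_false] at hxq
      obtain ⟨d1, d2, d3, d4⟩ := hd'.1 q hq
      rcases hx with e | e <;> rcases hxq with e' | e' <;> omega
    simp only [List.flatMap_cons, List.cons_append, List.nil_append]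
    refine List.nodup_cons.mpr ⟨?_, List.nodup_cons.mpr
      ⟨?_, ih hd'.2 (fun q hq => hne q (List.mem_cons_of_mem _ hq))⟩⟩
    · simp only [List.mem_cons]
      push Not
      exact ⟨hp12, hnotin p.1 (Or.inl rfl)⟩
    · exact hnotin p.2 (Or.inr rfl)

-- the heart: B's recursive search succeeds exactly when a matching exists
lemma getD_cons_pos (w : String) (ws : List String) (k : Nat) (hk : 1 ≤ k) :
    (w :: ws).getD k "" = ws.getD (k - 1) "" := by
  obtain ⟨k', rfl⟩ : ∃ k', k = k' + 1 := ⟨k - 1, by omega⟩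
  simp

lemma M_small (L : List String) (h : L.length ≤ 1) : M L := by
  refine ⟨[], List.Pairwise.nil, ?_, ?_, ?_, ?_⟩
  · simp only [List.length_nil]
    omega
  · simp
  · simp
  · simp

lemma matchable_iff_M : ∀ (fuel : Nat) (L : List String), L.length ≤ fuel →
    (matchable L = true ↔ M L) := by
  intro fuel
  induction fuel with
  | zero =>
    intro L hL
    obtain rfl : L = [] := List.eq_nil_of_length_eq_zero (by omega)
    rw [matchable]
    simp only [true_iff]
    exact M_small [] (by simp)
  | succ n ih =>
    intro L hL
    match L with
    | [] =>
      rw [matchable]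
      simp only [true_iff]
      exact M_small [] (by simp)
    | [w] =>
      rw [matchable]
      simp only [true_iff]
      exact M_small [w] (by simp)
    | w :: x :: xs =>
      have hL' : (x :: xs).length ≤ n := by
        simp only [List.length_cons] at hL ⊢
        omega
      constructor
      · intro hm
        rcases (matchable_cons_iff w x xs).mp hm with ⟨hpar, hm'⟩ | ⟨i, hi, hpal, hm'⟩
        · -- B skipped the head word: shift the matching of the tail up by one
          obtain ⟨com, hlex, hlen, hb, hd, hp⟩ := (ih _ hL').mp hm'
          refine ⟨com.map (fun p => (p.1 + 1, p.2 + 1)), ?_, ?_, ?_, ?_, ?_⟩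
          · exact List.pairwise_map.mpr (hlex.imp (fun {a b} h => by
              unfold lexLt at h ⊢; omega))
          · simp only [List.length_map, hlen, List.length_cons] at hpar ⊢
            omega
          · rintro p hp'
            obtain ⟨q, hq, rfl⟩ := List.mem_map.mp hp'
            have := hb q hq
            simp only [List.length_cons] at this ⊢
            omega
          · exact List.pairwise_map.mpr (hd.imp (fun {a b} h => by
              unfold Disj at h ⊢; omega))
          · rintro p hp'
            obtain ⟨q, hq, rfl⟩ := List.mem_map.mp hp'
            simpa using hp q hq
        · -- B matched the head with rest[i]: add the pair (0, i+1), shift the rest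
          have hL2 : ((x :: xs).eraseIdx i).length = (x :: xs).length - 1 := by
            rw [List.length_eraseIdx, if_pos hi]
          obtain ⟨com, hlex, hlen, hb, hd, hp⟩ := (ih _ (by rw [hL2]; omega)).mp hm'
          rw [hL2] at hlen
          simp only [hL2] at hb
          have hgd : ∀ k, (w :: x :: xs).getD (if k < i then k + 1 else k + 2) "" =
              ((x :: xs).eraseIdx i).getD k "" := by
            intro k
            rw [getD_eraseIdx]
            split_ifs with hk
            · simp
            · rw [show k + 2 = (k + 1) + 1 from rfl, List.getD_cons_succ]
          refine ⟨(0, i + 1) :: com.map (fun p => (if p.1 < i then p.1 + 1 else p.1 + 2,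
              if p.2 < i then p.2 + 1 else p.2 + 2)), ?_, ?_, ?_, ?_, ?_⟩
          · refine List.pairwise_cons.mpr ⟨?_, ?_⟩
            · rintro p hp'
              obtain ⟨q, hq, rfl⟩ := List.mem_map.mp hp'
              unfold lexLt
              try dsimp only
              split_ifs <;> omega
            · exact List.pairwise_map.mpr (hlex.imp (fun {a b} h => by
                unfold lexLt at h ⊢; dsimp only; split_ifs <;> omega))
          · simp only [List.length_cons, List.length_map, hlen]
            simp only [List.length_cons] at hi
            omega
          · rintro p hp'
            rcases List.mem_cons.mp hp' with rfl | hp''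
            · simp only [List.length_cons] at hi ⊢
              omega
            · obtain ⟨q, hq, rfl⟩ := List.mem_map.mp hp''
              have := hb q hq
              simp only [List.length_cons] at this ⊢
              try dsimp only
              split_ifs <;> omega
          · refine List.pairwise_cons.mpr ⟨?_, ?_⟩
            · rintro p hp'
              obtain ⟨q, hq, rfl⟩ := List.mem_map.mp hp'
              unfold Disj
              try dsimp only
              split_ifs <;> omega
            · exact List.pairwise_map.mpr (hd.imp (fun {a b} h => by
                unfold Disj at h ⊢; dsimp only; split_ifs <;> omega))
          · rintro p hp'
            rcases List.mem_cons.mp hp' with rfl | hp''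
            · simpa using hpal
            · obtain ⟨q, hq, rfl⟩ := List.mem_map.mp hp''
              try dsimp only
              rw [hgd q.1, hgd q.2]
              exact hp q hq
      · rintro ⟨com, hlex, hlen, hb, hd, hp⟩
        have hne : ∀ p ∈ com, p.1 ≠ p.2 := fun p hp' => by have := hb p hp'; omega
        by_cases hex : ∃ j, (0, j) ∈ com
        · -- a pair (0, j) covers the head: match it, shift the other pairs down
          obtain ⟨j, hj⟩ := hex
          have hjb := hb _ hj
          simp only [List.length_cons] at hjb
          obtain ⟨c1, c2, hcom⟩ := List.append_of_mem hj
          have hsubl : (c1 ++ c2).Sublist com := by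
            rw [hcom]
            exact List.Sublist.append (List.Sublist.refl c1) (List.sublist_cons_self _ _)
          have hmemc : ∀ p ∈ c1 ++ c2, p ∈ com := fun p hp' => hsubl.subset hp'
          have hd0 : ∀ p ∈ c1 ++ c2, Disj p (0, j) := by
            rw [hcom] at hd
            intro p hp'
            rcases List.mem_append.mp hp' with h1 | h2
            · exact (List.pairwise_append.mp hd).2.2 p h1 (0, j) List.mem_cons_self
            · have := (List.pairwise_cons.mp (List.pairwise_append.mp hd).2.1).1 p h2
              unfold Disj at this ⊢
              omega
          have hfacts : ∀ p ∈ c1 ++ c2,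
              1 ≤ p.1 ∧ p.1 ≠ j ∧ 1 ≤ p.2 ∧ p.2 ≠ j ∧ p.1 < p.2 ∧ p.2 < xs.length + 2 := by
            intro p hp'
            have h1 := hd0 p hp'
            have h2 := hb p (hmemc p hp')
            simp only [List.length_cons] at h2
            unfold Disj at h1
            omega
          have hjlt : j - 1 < (x :: xs).length := by
            simp only [List.length_cons]
            omega
          have hL2 : ((x :: xs).eraseIdx (j - 1)).length = xs.length := by
            rw [List.length_eraseIdx, if_pos hjlt]
            simp
          have hgd : ∀ k, 1 ≤ k → k ≠ j →
              ((x :: xs).eraseIdx (j - 1)).getD (if k < j then k - 1 else k - 2) "" =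
              (w :: x :: xs).getD k "" := by
            intro k h1 h2
            rw [getD_cons_pos w _ k h1, getD_eraseIdx]
            by_cases hk : k < j
            · rw [if_pos hk, if_pos (by omega)]
            · rw [if_neg hk, if_neg (by omega)]
              congr 1
              omega
          have hM' : M ((x :: xs).eraseIdx (j - 1)) := by
            refine ⟨(c1 ++ c2).map (fun p => (if p.1 < j then p.1 - 1 else p.1 - 2,
                if p.2 < j then p.2 - 1 else p.2 - 2)), ?_, ?_, ?_, ?_, ?_⟩
            · refine List.pairwise_map.mpr ((hlex.sublist hsubl).imp_of_mem
                (fun {a b} ha hb' h => ?_))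
              have f1 := hfacts a ha
              have f2 := hfacts b hb'
              unfold lexLt at h ⊢
              try dsimp only
              split_ifs <;> omega
            · have hcl : com.length = c1.length + c2.length + 1 := by
                rw [hcom]
                simp
                omega
              simp only [List.length_map, List.length_append, hL2]
              simp only [List.length_cons] at hlen
              omega
            · rintro p hp'
              obtain ⟨q, hq, rfl⟩ := List.mem_map.mp hp'
              have f1 := hfacts q hq
              rw [hL2]
              try dsimp only
              split_ifs <;> omega
            · refine List.pairwise_map.mpr ((hd.sublist hsubl).imp_of_mem
                (fun {a b} ha hb' h => ?_))
              have f1 := hfacts a ha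
              have f2 := hfacts b hb'
              unfold Disj at h ⊢
              try dsimp only
              split_ifs <;> omega
            · rintro p hp'
              obtain ⟨q, hq, rfl⟩ := List.mem_map.mp hp'
              have f1 := hfacts q hq
              try dsimp only
              rw [hgd q.1 (by omega) (by omega), hgd q.2 (by omega) (by omega)]
              exact hp q (hmemc q hq)
          have hm' := (ih _ (by rw [hL2]; simp only [List.length_cons] at hL'; omega)).mpr hM'
          apply (matchable_cons_iff w x xs).mpr
          right
          refine ⟨j - 1, hjlt, ?_, hm'⟩
          have := hp _ hj
          rw [getD_cons_pos w _ j (by omega)] at this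
          simpa using this
        · -- no pair covers the head: the length must be odd, skip the head
          have hz : ∀ p ∈ com, 1 ≤ p.1 ∧ 1 ≤ p.2 := by
            intro p hp'
            have hbp := hb p hp'
            rcases p with ⟨a, b⟩
            dsimp only at hbp ⊢
            have ha : 1 ≤ a := by
              by_contra h
              have : a = 0 := by omega
              subst this
              exact hex ⟨b, hp'⟩
            omega
          have hodd : (xs.length + 2) % 2 = 1 := by
            by_contra hpar
            have hnodup := endpoints_nodup com hd hne
            have hlenE := endpoints_length com
            have hsubE : ∀ e ∈ com.flatMap (fun p => [p.1, p.2]),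
                e ∈ List.range' 1 (xs.length + 1) := by
              intro e he
              obtain ⟨q, hq, he'⟩ := List.mem_flatMap.mp he
              have h1 := hz q hq
              have h2 := hb q hq
              simp only [List.length_cons] at h2
              simp only [List.mem_cons, List.not_mem_nil, or_false] at he'
              rw [List.mem_range'_1]
              rcases he' with rfl | rfl <;> omega
            have hle := (List.subperm_of_subset hnodup hsubE).length_le
            rw [List.length_range', hlenE] at hle
            simp only [List.length_cons] at hlen
            omega
          have hM' : M (x :: xs) := by
            refine ⟨com.map (fun p => (p.1 - 1, p.2 - 1)), ?_, ?_, ?_, ?_, ?_⟩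
            · exact List.pairwise_map.mpr (hlex.imp_of_mem (fun {a b} ha hb' h => by
                have f1 := hz a ha
                have f2 := hz b hb'
                unfold lexLt at h ⊢
                omega))
            · simp only [List.length_map, List.length_cons] at hlen ⊢
              omega
            · rintro p hp'
              obtain ⟨q, hq, rfl⟩ := List.mem_map.mp hp'
              have f1 := hz q hq
              have f2 := hb q hq
              simp only [List.length_cons] at f2 ⊢
              omega
            · exact List.pairwise_map.mpr (hd.imp_of_mem (fun {a b} ha hb' h => by
                have f1 := hz a ha
                have f2 := hz b hb'
                unfold Disj at h ⊢
                omega))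
            · rintro p hp'
              obtain ⟨q, hq, rfl⟩ := List.mem_map.mp hp'
              have f1 := hz q hq
              have := hp q hq
              rw [getD_cons_pos w _ q.1 f1.1, getD_cons_pos w _ q.2 f1.2] at this
              exact this
          have hm' := (ih _ hL').mpr hM'
          exact (matchable_cons_iff w x xs).mpr (Or.inl ⟨by simp only [List.length_cons] at hodd ⊢; omega, hm'⟩)

lemma accept_eq_matchable (L : List String) : acceptA L = matchable L := by
  rw [Bool.eq_iff_iff, acceptA_iff_M, matchable_iff_M L.length L le_rfl]

-- the outer loop is B's filter
lemma goA_eq (num1 : String) (full lst : List String) (hsub : ∀ w ∈ lst, w ∈ full) :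
    goA num1 full lst =
      lst.filter (fun w => isPalindrome num1 w && matchable (minusFirst full w)) := by
  induction lst with
  | nil => simp [goA]
  | cons w rest ih =>
    have hw : w ∈ full := hsub w List.mem_cons_self
    have hrm := PySem.List.remove?_eq_some_erase full w hw
    have ih' := ih (fun z hz => hsub z (List.mem_cons_of_mem _ hz))
    simp only [goA, hrm, Option.getD_some, List.filter_cons, minusFirst,
      accept_eq_matchable, ih']
    cases h1 : isPalindrome num1 w <;> cases h2 : matchable (full.erase w) <;> simp


-- ===== VERDICT (by name: the statement is the Claim_ definition above) =====
theorem solution_spec : Claim_equal_solution := by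
  intro P _ hpre
  unfold Spec_solution
  match P with
  | [] => exact absurd rfl hpre
  | num1 :: words_list =>
    show goA num1 words_list words_list = _
    simp only [solution_alt]
    rw [goA_eq num1 words_list words_list (fun w hw => hw)]
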